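-- pv_equiv track=rewrite | github.com/pypi-data/pypi-mirror-12 | packages/pemjh/pemjh-0.0.1.zip/pemjh-0.0.1/src/pemjh/challenge088/__init__.py | findPossibleProducts
-- ===== SOURCE A (Python) =====
-- def findPossibleProducts(limit, known=dict()):
--
--     if limit in known:
--         return known[limit]
--
--     products = set()
--
--     multi = 2
--     while multi <= limit:
--         for multi2, s, d in findPossibleProducts(limit // multi):
--             products.add((multi * multi2, s + multi, d + 1))
--
--         products.add((multi, multi, 1))
--         multi += 1
--
--     known[limit] = products
--     return products
-- ===== SOURCE B (Python) =====
-- def findPossibleProducts(limit, known=dict()):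
--     # Bottom-up DP over the distinct quotient values limit//m only, instead of A's
--     # memoised recursion through a mutable default argument.
--     if limit in known:
--         return known[limit]
--     # distinct values of limit // m via the standard divisor-block jump
--     quots = set()
--     m = 1
--     while m <= limit:
--         q = limit // m
--         quots.add(q)
--         m = limit // q + 1
--     # fill the table in increasing order; every n // multi is again a quotient of limit
--     table = {}
--     for n in sorted(quots):
--         products = set()
--         for multi in range(2, n + 1):
--             sub = table.get(n // multi)
--             if sub:
--                 products.update((multi * multi2, s + multi, d + 1) for multi2, s, d in sub)
--             products.add((multi, multi, 1))
--         table[n] = products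
--     result = table.get(limit, set())
--     known[limit] = result
--     return result
-- ===== Notes on version B (the rewrite author's own statement) =====
-- stated objective: alternative
-- what changed: A computes the set by naive recursion on limit//multi, relying for speed on memoisation through a mutable default-dict argument shared across calls; B instead enumerates the distinct quotient values limit//m with the divisor-block jump and fills an explicit DP table bottom-up over those values only, with no recursion and no hidden cross-call state.
import Mathlib
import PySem

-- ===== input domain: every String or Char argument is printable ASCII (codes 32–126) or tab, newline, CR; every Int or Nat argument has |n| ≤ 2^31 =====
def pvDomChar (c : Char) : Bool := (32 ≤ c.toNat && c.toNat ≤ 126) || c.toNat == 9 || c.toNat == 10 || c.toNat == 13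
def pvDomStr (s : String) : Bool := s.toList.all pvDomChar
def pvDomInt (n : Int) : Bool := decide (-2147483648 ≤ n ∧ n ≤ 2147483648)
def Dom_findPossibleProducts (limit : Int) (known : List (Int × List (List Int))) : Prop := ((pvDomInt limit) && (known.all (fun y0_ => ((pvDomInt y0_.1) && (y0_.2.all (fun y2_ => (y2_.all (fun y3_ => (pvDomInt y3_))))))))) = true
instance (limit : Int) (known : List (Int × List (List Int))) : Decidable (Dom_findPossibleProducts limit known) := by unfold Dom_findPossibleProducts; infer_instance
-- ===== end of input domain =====

-- B replaces A's memoised recursion (through a mutable default dict) by a bottom-up DP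
-- table filled only at the distinct quotient values limit//m, in increasing order;
-- return values agree (both A and B also write the result into the passed `known`
-- dict — the equivalence proved here is about the return value).


-- ===== PORT A =====
-- inner body of A's `for multi2, s, d in …: products.add((multi*multi2, s+multi, d+1))`
-- (the set's triples are 3-lists [p, s, d])
def findPossibleProductsAdd (multi : Int) (acc : PySem.Set (List Int)) (t : List Int) : PySem.Set (List Int) :=
  match t with
  | [multi2, s, d] => PySem.Set.add acc [multi * multi2, s + multi, d + 1]
  | _ => acc

-- A's recursion (the `while multi <= limit` counting loop as the fold over multi = 2..limit);
-- `fuel` only makes the recursion on limit // multi structural — it is never exhausted when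
-- started with limit.toNat + 1 (the recursive argument's toNat strictly decreases).
def findPossibleProductsCore : Nat → Int → PySem.Set (List Int)
  | 0, _ => PySem.Set.empty
  | fuel + 1, limit =>
    (PySem.List.pyRange 2 (limit + 1)).foldl
      (fun products multi =>
        PySem.Set.add
          ((findPossibleProductsCore fuel (PySem.Int.floordiv limit multi)).foldl
            (findPossibleProductsAdd multi) products)
          [multi, multi, 1])
      PySem.Set.empty

def findPossibleProducts (limit : Int) (known : List (Int × List (List Int))) : List (List Int) :=
  match (PySem.Dict.mk known).get? limit with
  | some v => v
  | none => findPossibleProductsCore (limit.toNat + 1) limit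

-- ===== PORT B =====
-- B's `while m <= limit` divisor-block loop collecting the distinct values limit // m
-- (fuel = limit.toNat + 1 only makes it structural; m strictly increases each step)
def findPossibleProductsQuots : Nat → Int → Int → PySem.Set Int → PySem.Set Int
  | 0, _, _, acc => acc
  | fuel + 1, limit, m, acc =>
    if m ≤ limit then
      let q := PySem.Int.floordiv limit m
      findPossibleProductsQuots fuel limit (PySem.Int.floordiv limit q + 1) (PySem.Set.add acc q)
    else acc

-- one table entry: B's inner `for multi in range(2, n+1)` loop over the already-filled
-- table (`table.get(n // multi)` is None/falsy exactly when the guarded getD is empty)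
def findPossibleProductsStep (table : PySem.Dict Int (PySem.Set (List Int))) (n : Int) : PySem.Set (List Int) :=
  (PySem.List.pyRange 2 (n + 1)).foldl
    (fun products multi =>
      PySem.Set.add
        (if (table.getD (PySem.Int.floordiv n multi) PySem.Set.empty).isEmpty then products
         else (table.getD (PySem.Int.floordiv n multi) PySem.Set.empty).foldl
          (fun acc t =>
            match t with
            | [multi2, s, d] => PySem.Set.add acc [multi * multi2, s + multi, d + 1]
            | _ => acc)
          products)
        [multi, multi, 1])
    PySem.Set.empty

def findPossibleProducts_alt (limit : Int) (known : List (Int × List (List Int))) : List (List Int) :=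
  match (PySem.Dict.mk known).get? limit with
  | some v => v
  | none =>
    let quots := findPossibleProductsQuots (limit.toNat + 1) limit 1 PySem.Set.empty
    let table := (PySem.List.sorted quots (fun x => x)).foldl
      (fun tb n => tb.insert n (findPossibleProductsStep tb n)) PySem.Dict.empty
    table.getD limit PySem.Set.empty

-- ===== PRECONDITION & SPEC =====
def Spec_findPossibleProducts (limit : Int) (known : List (Int × List (List Int))) (out : List (List Int)) : Prop := out = findPossibleProducts_alt limit known
instance (limit : Int) (known : List (Int × List (List Int))) (out : List (List Int)) : Decidable (Spec_findPossibleProducts limit known out) := by unfold Spec_findPossibleProducts; infer_instance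

-- ===== CLAIM (what is proved, stated in full; the proofs are below) =====
def Claim_equal_findPossibleProducts : Prop := ∀ (limit : Int) (known : List (Int × List (List Int))), Dom_findPossibleProducts limit known → Spec_findPossibleProducts limit known (findPossibleProducts limit known)

-- ===== LEMMAS AND PROOFS =====

theorem pvFloordivToNatLt (limit multi : Int) (h1 : 2 ≤ multi) (h2 : multi ≤ limit) :
    (PySem.Int.floordiv limit multi).toNat < limit.toNat := by
  rw [PySem.Int.floordiv_eq_ediv_of_pos (by omega)]
  have h : limit / multi = ((limit.toNat / multi.toNat : Nat) : Int) := by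
    rw [Int.natCast_div]
    congr 1 <;> omega
  rw [h, Int.toNat_natCast]
  exact Nat.div_lt_self (by omega) (by omega)

-- the fuel never matters once it exceeds limit.toNat
theorem pvCore_fuel_irrel : ∀ (f1 : Nat) (limit : Int) (f2 : Nat), limit.toNat < f1 → limit.toNat < f2 →
    findPossibleProductsCore f1 limit = findPossibleProductsCore f2 limit := by
  intro f1
  induction f1 with
  | zero => intro limit f2 h1 _; omega
  | succ f ih =>
    intro limit f2 h1 h2
    cases f2 with
    | zero => omega
    | succ g =>
      rw [findPossibleProductsCore, findPossibleProductsCore]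
      apply PySem.List.foldl_congr_mem
      intro acc m hm
      rw [PySem.List.mem_pyRange_one] at hm
      have hlt : (PySem.Int.floordiv limit m).toNat < limit.toNat :=
        pvFloordivToNatLt limit m (by omega) (by omega)
      rw [ih (PySem.Int.floordiv limit m) g (by omega) (by omega)]

-- A's pure computation as a function of the limit alone
def pvA (n : Int) : PySem.Set (List Int) := findPossibleProductsCore (n.toNat + 1) n

theorem pvA_of_lt_two (n : Int) (h : n < 2) : pvA n = PySem.Set.empty := by
  rw [pvA, findPossibleProductsCore]
  have : PySem.List.pyRange 2 (n + 1) = [] := by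
    apply List.eq_nil_iff_forall_not_mem.mpr
    intro x hx
    rw [PySem.List.mem_pyRange_one] at hx
    omega
  simp [this]

-- B's step computes A's value whenever the table already answers every n // multi correctly
theorem pvStep_eq (n : Int) (table : PySem.Dict Int (PySem.Set (List Int)))
    (htb : ∀ m : Int, 2 ≤ m → m ≤ n →
      table.getD (PySem.Int.floordiv n m) PySem.Set.empty = pvA (PySem.Int.floordiv n m)) :
    findPossibleProductsStep table n = pvA n := by
  rw [findPossibleProductsStep, pvA, findPossibleProductsCore]
  apply PySem.List.foldl_congr_mem
  intro acc m hm
  rw [PySem.List.mem_pyRange_one] at hm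
  have hlt : (PySem.Int.floordiv n m).toNat < n.toNat := pvFloordivToNatLt n m (by omega) (by omega)
  have hq : table.getD (PySem.Int.floordiv n m) PySem.Set.empty =
      findPossibleProductsCore n.toNat (PySem.Int.floordiv n m) := by
    rw [htb m (by omega) (by omega), pvA]
    exact pvCore_fuel_irrel _ _ _ (by omega) (by omega)
  rw [hq]
  congr 1
  by_cases he : (findPossibleProductsCore n.toNat (PySem.Int.floordiv n m)).isEmpty
  · rw [if_pos he, List.isEmpty_iff.mp he]
    rfl
  · rw [if_neg he]
    rfl

-- the table after folding a list L of limits (each of whose sub-quotients ≥ 2 appears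
-- earlier in L) holds pvA k exactly at the members of L
theorem pvFold_table : ∀ (L : List Int),
    (∀ (p : List Int) (x : Int) (suf : List Int), L = p ++ x :: suf →
      ∀ m : Int, 2 ≤ m → m ≤ x → 2 ≤ PySem.Int.floordiv x m → PySem.Int.floordiv x m ∈ p) →
    ∀ k : Int,
    (L.foldl (fun tb n => tb.insert n (findPossibleProductsStep tb n)) PySem.Dict.empty).getD k PySem.Set.empty
      = if k ∈ L then pvA k else PySem.Set.empty := by
  intro L
  induction L using List.reverseRecOn with
  | nil => intro _ k; simp [PySem.Dict.getD_empty]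
  | append_singleton L n ih =>
    intro hclose k
    have hcloseL : ∀ (p : List Int) (x : Int) (suf : List Int), L = p ++ x :: suf →
        ∀ m : Int, 2 ≤ m → m ≤ x → 2 ≤ PySem.Int.floordiv x m → PySem.Int.floordiv x m ∈ p := by
      intro p x suf hL
      exact hclose p x (suf ++ [n]) (by rw [hL]; simp)
    have ihL := ih hcloseL
    rw [List.foldl_append, List.foldl_cons, List.foldl_nil, PySem.Dict.getD_insert]
    have hstep : findPossibleProductsStep
        (L.foldl (fun tb n => tb.insert n (findPossibleProductsStep tb n)) PySem.Dict.empty) n = pvA n := by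
      apply pvStep_eq
      intro m hm2 hmn
      rw [ihL (PySem.Int.floordiv n m)]
      by_cases hc : 2 ≤ PySem.Int.floordiv n m
      · rw [if_pos (hclose L n [] rfl m hm2 hmn hc)]
      · by_cases hmem : PySem.Int.floordiv n m ∈ L
        · rw [if_pos hmem]
        · rw [if_neg hmem, pvA_of_lt_two _ (by omega)]
    by_cases hk : k = n
    · rw [if_pos hk, if_pos (by simp [hk]), hk, hstep]
    · rw [if_neg hk, ihL k]
      exact if_congr (by simp [hk]) rfl rfl

-- every j in the block [m, limit // (limit // m)] gives the same quotient limit // j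
theorem pvQuotBlock (limit m j : Int) (h1 : 1 ≤ m) (hml : m ≤ limit) (hj : m ≤ j)
    (hjq : j ≤ PySem.Int.floordiv limit (PySem.Int.floordiv limit m)) :
    PySem.Int.floordiv limit j = PySem.Int.floordiv limit m := by
  have hq1 : 1 ≤ PySem.Int.floordiv limit m := by
    rw [PySem.Int.le_floordiv_iff_mul_le (by omega)]; omega
  have hjpos : 0 < j := by omega
  have hle : PySem.Int.floordiv limit m ≤ PySem.Int.floordiv limit j := by
    rw [PySem.Int.le_floordiv_iff_mul_le hjpos]
    have := (PySem.Int.le_floordiv_iff_mul_le (b := PySem.Int.floordiv limit m) (by omega)).mp hjq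
    linarith
  have hge : PySem.Int.floordiv limit j ≤ PySem.Int.floordiv limit m := by
    have h2 : limit < (PySem.Int.floordiv limit m + 1) * m :=
      (PySem.Int.floordiv_lt_iff_lt_mul (by omega)).mp (by omega)
    have h3 : PySem.Int.floordiv limit j < PySem.Int.floordiv limit m + 1 := by
      rw [PySem.Int.floordiv_lt_iff_lt_mul hjpos]
      have : (PySem.Int.floordiv limit m + 1) * m ≤ (PySem.Int.floordiv limit m + 1) * j :=
        mul_le_mul_of_nonneg_left hj (by omega)
      linarith
    omega
  omega

-- membership in the accumulator is preserved by the block loop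
theorem pvQuots_mono : ∀ (fuel : Nat) (limit m : Int) (acc : PySem.Set Int) (x : Int),
    x ∈ acc → x ∈ findPossibleProductsQuots fuel limit m acc := by
  intro fuel
  induction fuel with
  | zero => intro limit m acc x hx; exact hx
  | succ f ih =>
    intro limit m acc x hx
    rw [findPossibleProductsQuots]
    by_cases h : m ≤ limit
    · rw [if_pos h]
      exact ih _ _ _ _ ((PySem.Set.mem_add _ _ _).mpr (Or.inl hx))
    · rw [if_neg h]; exact hx

-- everything the loop collects is a quotient limit // j with m ≤ j ≤ limit
theorem pvQuots_sound : ∀ (fuel : Nat) (limit m : Int) (acc : PySem.Set Int) (x : Int), 1 ≤ m →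
    x ∈ findPossibleProductsQuots fuel limit m acc →
    x ∈ acc ∨ ∃ j : Int, m ≤ j ∧ j ≤ limit ∧ x = PySem.Int.floordiv limit j := by
  intro fuel
  induction fuel with
  | zero => intro limit m acc x _ hx; exact Or.inl hx
  | succ f ih =>
    intro limit m acc x hm hx
    rw [findPossibleProductsQuots] at hx
    by_cases h : m ≤ limit
    · rw [if_pos h] at hx
      have hq1 : 1 ≤ PySem.Int.floordiv limit m := by
        rw [PySem.Int.le_floordiv_iff_mul_le (by omega)]; omega
      have hmq : m ≤ PySem.Int.floordiv limit (PySem.Int.floordiv limit m) := by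
        rw [PySem.Int.le_floordiv_iff_mul_le (by omega)]
        have : PySem.Int.floordiv limit m * m ≤ limit :=
          (PySem.Int.le_floordiv_iff_mul_le (by omega)).mp (le_refl _)
        linarith
      rcases ih limit _ _ x (by omega) hx with hacc | ⟨j, hj1, hj2, hj3⟩
      · rcases (PySem.Set.mem_add _ _ _).mp hacc with hacc | hq
        · exact Or.inl hacc
        · exact Or.inr ⟨m, le_refl m, h, hq⟩
      · exact Or.inr ⟨j, by omega, hj2, hj3⟩
    · rw [if_neg h] at hx; exact Or.inl hx

-- and it collects EVERY quotient limit // j with m ≤ j ≤ limit (given enough fuel)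
theorem pvQuots_complete : ∀ (fuel : Nat) (limit m : Int) (acc : PySem.Set Int) (j : Int),
    limit.toNat + 1 ≤ fuel + m.toNat → 1 ≤ m → m ≤ j → j ≤ limit →
    PySem.Int.floordiv limit j ∈ findPossibleProductsQuots fuel limit m acc := by
  intro fuel
  induction fuel with
  | zero => intro limit m acc j hf hm hj1 hj2; omega
  | succ f ih =>
    intro limit m acc j hf hm hj1 hj2
    have h : m ≤ limit := by omega
    rw [findPossibleProductsQuots, if_pos h]
    have hq1 : 1 ≤ PySem.Int.floordiv limit m := by
      rw [PySem.Int.le_floordiv_iff_mul_le (by omega)]; omega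
    have hmq : m ≤ PySem.Int.floordiv limit (PySem.Int.floordiv limit m) := by
      rw [PySem.Int.le_floordiv_iff_mul_le (by omega)]
      have : PySem.Int.floordiv limit m * m ≤ limit :=
        (PySem.Int.le_floordiv_iff_mul_le (by omega)).mp (le_refl _)
      linarith
    by_cases hblk : j ≤ PySem.Int.floordiv limit (PySem.Int.floordiv limit m)
    · rw [pvQuotBlock limit m j hm h hj1 hblk]
      exact pvQuots_mono _ _ _ _ _ ((PySem.Set.mem_add _ _ _).mpr (Or.inr rfl))
    · exact ih limit _ _ j (by omega) (by omega) (by omega) hj2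

-- ===== VERDICT (by name: the statement is the Claim_ definition above) =====
theorem findPossibleProducts_spec : Claim_equal_findPossibleProducts := by
  intro limit known _
  unfold Spec_findPossibleProducts findPossibleProducts findPossibleProducts_alt
  cases hg : (PySem.Dict.mk known).get? limit with
  | some v => rfl
  | none =>
    show findPossibleProductsCore (limit.toNat + 1) limit =
      ((PySem.List.sorted (findPossibleProductsQuots (limit.toNat + 1) limit 1 PySem.Set.empty) (fun x => x)).foldl
        (fun tb n => tb.insert n (findPossibleProductsStep tb n)) PySem.Dict.empty).getD limit PySem.Set.empty
    by_cases hlim : 1 ≤ limit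
    case neg =>
      -- empty quotient list: both sides are the empty set
      have hq : findPossibleProductsQuots (limit.toNat + 1) limit 1 PySem.Set.empty = PySem.Set.empty := by
        rw [findPossibleProductsQuots, if_neg (by omega)]
      rw [hq]
      have hs : PySem.List.sorted (PySem.Set.empty : PySem.Set Int) (fun x => x) = [] := by
        have := PySem.List.sorted_perm (PySem.Set.empty : PySem.Set Int) (fun x => x) false
        exact List.Perm.eq_nil this
      rw [hs]
      simp only [List.foldl_nil, PySem.Dict.getD_empty]
      exact pvA_of_lt_two limit (by omega)
    case pos =>
      set Qs := findPossibleProductsQuots (limit.toNat + 1) limit 1 PySem.Set.empty with hQs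
      set L := PySem.List.sorted Qs (fun x => x) with hL
      have hmemL : ∀ x : Int, x ∈ L ↔ x ∈ Qs := fun x => PySem.List.mem_sorted Qs _ false x
      have hpair : L.Pairwise (· ≤ ·) := PySem.List.sorted_pairwise Qs (fun x => x)
      have hclose : ∀ (p : List Int) (x : Int) (suf : List Int), L = p ++ x :: suf →
          ∀ m : Int, 2 ≤ m → m ≤ x → 2 ≤ PySem.Int.floordiv x m → PySem.Int.floordiv x m ∈ p := by
        intro p x suf hsplit m hm2 hmx hq2
        have hxL : x ∈ L := by rw [hsplit]; simp
        rcases (pvQuots_sound _ limit 1 _ x (le_refl 1) ((hmemL x).mp hxL)).resolve_left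
          (by simp [PySem.Set.empty]) with ⟨j, hj1, hj2, hj3⟩
        -- x // m is again a quotient of limit: x // m = limit // (j * m)
        have hjpos : 0 < j := by omega
        have hident : PySem.Int.floordiv x m = PySem.Int.floordiv limit (j * m) := by
          rw [hj3, PySem.Int.floordiv_eq_ediv_of_pos (by omega : (0:Int) < m),
            PySem.Int.floordiv_eq_ediv_of_pos hjpos,
            PySem.Int.floordiv_eq_ediv_of_pos (by positivity : (0:Int) < j * m)]
          exact Int.ediv_ediv_of_nonneg (by omega)
        have hjm : j * m ≤ limit := by
          have := (PySem.Int.le_floordiv_iff_mul_le (by positivity : (0:Int) < j * m)).mp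
            (by rw [← hident]; omega : (1:Int) ≤ PySem.Int.floordiv limit (j * m))
          linarith
        have hmemQ : PySem.Int.floordiv x m ∈ Qs := by
          rw [hident]
          exact pvQuots_complete _ limit 1 _ (j * m) (by omega) (le_refl 1) (by nlinarith) hjm
        have hlt : PySem.Int.floordiv x m < x := by
          have := pvFloordivToNatLt x m hm2 hmx
          omega
        have hmemLx : PySem.Int.floordiv x m ∈ L := (hmemL _).mpr hmemQ
        rw [hsplit] at hmemLx hpair
        rcases List.mem_append.mp hmemLx with hp | hrest
        · exact hp
        · exfalso
          rcases List.mem_cons.mp hrest with heq | hsuf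
          · omega
          · have := (List.pairwise_append.mp hpair).2.1
            have hxle := (List.pairwise_cons.mp this).1 _ hsuf
            omega
      rw [pvFold_table L hclose limit]
      have hlimQ : limit ∈ L := by
        rw [hmemL]
        have h1 : PySem.Int.floordiv limit 1 = limit := by
          rw [PySem.Int.floordiv_eq_ediv_of_pos (by omega)]
          exact Int.ediv_one limit
        rw [← h1]
        exact pvQuots_complete _ limit 1 _ 1 (by omega) (le_refl 1) (le_refl 1) hlim
      rw [if_pos hlimQ]
      rfl
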